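-- pv_equiv track=rewrite | github.com/Hemedi18/afya-AI | AI_brain/views.py | _split_questions_and_advice
-- ===== SOURCE A (Python) =====
-- def _normalize_question_items(items):
-- 	"""Merge split fragments so each checkbox item is a complete question."""
-- 	def _question_key(text):
-- 		return ' '.join((text or '').strip().lower().rstrip('?.!,;:').split())
--
-- 	normalized = []
-- 	buffer = ""
--
-- 	for raw in (items or []):
-- 		text = (raw or '').strip().lstrip('-•0123456789. ').strip()
-- 		if not text:
-- 			continue
--
-- 		if buffer:
-- 			buffer = f"{buffer} {text}".strip()
-- 		else:
-- 			buffer = text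
--
-- 		if buffer.endswith('?'):
-- 			normalized.append(buffer)
-- 			buffer = ""
--
-- 	if buffer:
-- 		# Ensure last fragment still becomes a complete question
-- 		normalized.append(buffer.rstrip(' .,:;!') + '?')
--
-- 	# De-duplicate with canonical key
-- 	result = []
-- 	seen = set()
-- 	for q in normalized:
-- 		key = _question_key(q)
-- 		if key and key not in seen:
-- 			seen.add(key)
-- 			result.append(q)
-- 	return result
--
-- def _split_questions_and_advice(items):
-- 	"""Return (questions_for_checkbox, advisory_text)."""
-- 	questions = []
-- 	advice = []
-- 	seen_questions = set()
-- 	advice_markers = (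
-- 		'ushauri', 'tafadhali', 'wasiliana', 'daktari', 'kumbuka', 'epuka', 'unywe',
-- 		'pumzika', 'tembelea', 'hospitali', 'hatari', 'warning'
-- 	)
--
-- 	def _question_key(text):
-- 		return ' '.join((text or '').strip().lower().rstrip('?.!,;:').split())
--
-- 	for item in _normalize_question_items(items):
-- 		text = (item or '').strip()
-- 		if not text:
-- 			continue
-- 		lower = text.lower()
-- 		is_question = text.endswith('?') and len(text) > 8 and not any(m in lower for m in advice_markers)
-- 		if is_question:
-- 			q_key = _question_key(text)
-- 			if q_key and q_key not in seen_questions: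
-- 				seen_questions.add(q_key)
-- 				questions.append(text)
-- 		else:
-- 			advice.append(text)
-- 	return questions, advice
-- ===== SOURCE B (Python) =====
-- def _split_questions_and_advice(items):
--     """Return (questions_for_checkbox, advisory_text) — single streaming pass."""
--     advice_markers = (
--         'ushauri', 'tafadhali', 'wasiliana', 'daktari', 'kumbuka', 'epuka', 'unywe',
--         'pumzika', 'tembelea', 'hospitali', 'hatari', 'warning'
--     )
--
--     def _question_key(text):
--         return ' '.join(text.strip().lower().rstrip('?.!,;:').split())
--
--     questions = []
--     advice = []
--     seen = set()
--
--     def _emit(unit):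
--         key = _question_key(unit)
--         if not key or key in seen:
--             return
--         seen.add(key)
--         low = unit.lower()
--         if unit.endswith('?') and len(unit) > 8 and not any(m in low for m in advice_markers):
--             questions.append(unit)
--         else:
--             advice.append(unit)
--
--     buffer = ""
--     for raw in (items or []):
--         text = (raw or '').strip().lstrip('-•0123456789. ').strip()
--         if not text:
--             continue
--         buffer = text if not buffer else buffer + ' ' + text
--         if buffer.endswith('?'):
--             _emit(buffer)
--             buffer = ""
--     if buffer:
--         _emit(buffer.rstrip(' .,:;!') + '?')
--     return questions, advice
-- ===== Notes on version B (the rewrite author's own statement) =====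
-- stated objective: simpler
-- what changed: B replaces A's three sequential passes (fragment-merging normalization, key-based dedup, then classification) with a single streaming pass that, each time the buffer completes a question unit, dedups by canonical key and classifies it into questions/advice on the spot.
import Mathlib
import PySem

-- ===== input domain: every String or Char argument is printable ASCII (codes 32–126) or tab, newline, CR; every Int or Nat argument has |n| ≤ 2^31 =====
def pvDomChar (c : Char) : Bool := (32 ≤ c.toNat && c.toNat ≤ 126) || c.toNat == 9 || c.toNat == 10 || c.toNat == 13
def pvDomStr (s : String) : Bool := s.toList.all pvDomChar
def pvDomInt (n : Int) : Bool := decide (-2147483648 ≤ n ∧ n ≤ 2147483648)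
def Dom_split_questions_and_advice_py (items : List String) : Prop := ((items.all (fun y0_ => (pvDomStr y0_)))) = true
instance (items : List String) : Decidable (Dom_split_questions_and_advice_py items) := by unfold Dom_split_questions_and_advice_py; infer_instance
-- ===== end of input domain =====

-- B replaces A's three sequential passes (normalize+dedup, then classify) by one streaming
-- pass that emits, dedups and classifies each completed unit on the fly (objective: simpler).

-- ===== PORT A =====
-- shared string helpers (the Python defines _question_key with the same body in both
-- functions; both ports reuse these pure helpers)
def pvAdviceMarkers : List (List Char) :=
  ["ushauri".toList, "tafadhali".toList, "wasiliana".toList, "daktari".toList,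
   "kumbuka".toList, "epuka".toList, "unywe".toList, "pumzika".toList,
   "tembelea".toList, "hospitali".toList, "hatari".toList, "warning".toList]

-- s.lstrip(chars) / s.rstrip(chars): exact hand port (Python drops leading/trailing chars in the set)
def pvLStripC (s chars : List Char) : List Char := s.dropWhile (fun c => chars.contains c)
def pvRStripC (s chars : List Char) : List Char := (s.reverse.dropWhile (fun c => chars.contains c)).reverse

-- _question_key(text) = ' '.join(text.strip().lower().rstrip('?.!,;:').split())
def pvQKey (t : List Char) : List Char :=
  PySem.Chars.join [' '] (PySem.Chars.split₀ (pvRStripC (PySem.Chars.lower (PySem.Chars.strip t)) "?.!,;:".toList))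

-- (raw or '').strip().lstrip('-•0123456789. ').strip()
def pvClean (raw : List Char) : List Char :=
  PySem.Chars.strip (pvLStripC (PySem.Chars.strip raw) "-•0123456789. ".toList)

def pvNormStep (st : List (List Char) × List Char) (raw : List Char) : List (List Char) × List Char :=
  let text := pvClean raw
  if text = [] then st
  else
    let buffer := if st.2 ≠ [] then PySem.Chars.strip (st.2 ++ ' ' :: text) else text
    if PySem.Chars.endswith buffer ['?'] then (st.1 ++ [buffer], []) else (st.1, buffer)

def pvDedupStep (st : List (List Char) × PySem.Set (List Char)) (q : List Char) :
    List (List Char) × PySem.Set (List Char) :=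
  let key := pvQKey q
  if key ≠ [] ∧ key ∉ st.2 then (st.1 ++ [q], st.2.add key) else st

def pvNormalize (raws : List (List Char)) : List (List Char) :=
  let st := raws.foldl pvNormStep ([], [])
  let normalized := if st.2 ≠ [] then st.1 ++ [pvRStripC st.2 " .,:;!".toList ++ ['?']] else st.1
  (normalized.foldl pvDedupStep ([], [])).1

def pvClassifyStep (st : List (List Char) × List (List Char) × PySem.Set (List Char))
    (item : List Char) : List (List Char) × List (List Char) × PySem.Set (List Char) :=
  let text := PySem.Chars.strip item
  if text = [] then st
  else
    let lower := PySem.Chars.lower text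
    if PySem.Chars.endswith text ['?'] && decide (8 < text.length) &&
        !(pvAdviceMarkers.any (fun m => PySem.Chars.isIn m lower)) then
      let qkey := pvQKey text
      if qkey ≠ [] ∧ qkey ∉ st.2.2 then (st.1 ++ [text], st.2.1, st.2.2.add qkey) else st
    else (st.1, st.2.1 ++ [text], st.2.2)

def split_questions_and_advice_py (items : List String) : List String × List String :=
  let st := (pvNormalize (items.map String.toList)).foldl pvClassifyStep ([], [], [])
  (st.1.map String.mk, st.2.1.map String.mk)

-- ===== PORT B =====
def pvEmit (st : PySem.Set (List Char) × List (List Char) × List (List Char)) (unit : List Char) :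
    PySem.Set (List Char) × List (List Char) × List (List Char) :=
  let key := pvQKey unit
  if key = [] ∨ key ∈ st.1 then st
  else
    let low := PySem.Chars.lower unit
    if PySem.Chars.endswith unit ['?'] && decide (8 < unit.length) &&
        !(pvAdviceMarkers.any (fun m => PySem.Chars.isIn m low)) then
      (st.1.add key, st.2.1 ++ [unit], st.2.2)
    else (st.1.add key, st.2.1, st.2.2 ++ [unit])

def pvBStep (st : List Char × PySem.Set (List Char) × List (List Char) × List (List Char))
    (raw : List Char) : List Char × PySem.Set (List Char) × List (List Char) × List (List Char) :=
  let text := pvClean raw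
  if text = [] then st
  else
    let buffer := if st.1 = [] then text else st.1 ++ ' ' :: text
    if PySem.Chars.endswith buffer ['?'] then ([], pvEmit st.2 buffer) else (buffer, st.2)

def split_questions_and_advice_py_alt (items : List String) : List String × List String :=
  let r := (items.map String.toList).foldl pvBStep ([], [], [], [])
  let fin := if r.1 ≠ [] then pvEmit r.2 (pvRStripC r.1 " .,:;!".toList ++ ['?']) else r.2
  (fin.2.1.map String.mk, fin.2.2.map String.mk)

-- ===== PRECONDITION & SPEC =====
def Spec_split_questions_and_advice_py (items : List String) (out : List String × List String) : Prop := out = split_questions_and_advice_py_alt items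
instance (items : List String) (out : List String × List String) : Decidable (Spec_split_questions_and_advice_py items out) := by unfold Spec_split_questions_and_advice_py; infer_instance

-- ===== CLAIM (what is proved, stated in full; the proofs are below) =====
def Claim_equal_split_questions_and_advice_py : Prop := ∀ (items : List String), Dom_split_questions_and_advice_py items → Spec_split_questions_and_advice_py items (split_questions_and_advice_py items)

-- ===== LEMMAS AND PROOFS =====

-- "no leading whitespace"
def pvHeadOK : List Char → Prop
  | [] => True
  | c :: _ => PySem.Chars.isspace c = false

-- "no leading or trailing whitespace" (invariant of A's and B's buffer and of every emitted unit)
def pvOK (l : List Char) : Prop := pvHeadOK l ∧ pvHeadOK l.reverse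

lemma pvOK_nil : pvOK [] := ⟨trivial, trivial⟩

lemma pvHeadOK_of_prefix {l' l : List Char} (h : l' <+: l) (hl : pvHeadOK l) : pvHeadOK l' := by
  cases l' with
  | nil => trivial
  | cons c t =>
    obtain ⟨r, hr⟩ := h
    subst hr
    exact hl

lemma pvHeadOK_dropWhile (p : Char → Bool) (l : List Char)
    (hp : ∀ c, p c = false → PySem.Chars.isspace c = false) : pvHeadOK (l.dropWhile p) := by
  induction l with
  | nil => trivial
  | cons c t ih =>
    by_cases h : p c = true
    · simpa [List.dropWhile_cons, h] using ih
    · simp only [Bool.not_eq_true] at h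
      simpa [List.dropWhile_cons, h] using hp c h

lemma pvDropWhile_eq_self_of_headOK {l : List Char} (h : pvHeadOK l) :
    l.dropWhile PySem.Chars.isspace = l := by
  cases l with
  | nil => rfl
  | cons c t =>
    have h' : PySem.Chars.isspace c = false := h
    simp [List.dropWhile_cons, h']

lemma pvRevDrop_prefix (p : Char → Bool) (l : List Char) :
    (l.reverse.dropWhile p).reverse <+: l := by
  have h : l.reverse.dropWhile p <:+ l.reverse := List.dropWhile_suffix p
  have := List.reverse_suffix (l₁ := (l.reverse.dropWhile p).reverse) (l₂ := l)
  simpa [List.reverse_reverse] using this.mp (by simpa using h)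

lemma pvStrip_eq_self_of_OK {l : List Char} (h : pvOK l) : PySem.Chars.strip l = l := by
  unfold PySem.Chars.strip PySem.Chars.lstrip PySem.Chars.rstrip
  rw [pvDropWhile_eq_self_of_headOK h.1, pvDropWhile_eq_self_of_headOK h.2, List.reverse_reverse]

lemma pvOK_strip (s : List Char) : pvOK (PySem.Chars.strip s) := by
  unfold PySem.Chars.strip PySem.Chars.lstrip PySem.Chars.rstrip
  constructor
  · exact pvHeadOK_of_prefix (pvRevDrop_prefix _ _)
      (pvHeadOK_dropWhile _ _ (fun c h => h))
  · rw [List.reverse_reverse]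
    exact pvHeadOK_dropWhile _ _ (fun c h => h)

lemma pvOK_clean (raw : List Char) : pvOK (pvClean raw) := pvOK_strip _

lemma pvOK_join {a b : List Char} (ha : pvOK a) (hb : pvOK b) (na : a ≠ []) (nb : b ≠ []) :
    pvOK (a ++ ' ' :: b) := by
  constructor
  · cases a with
    | nil => exact absurd rfl na
    | cons c t => exact ha.1
  · rw [List.reverse_append, List.reverse_cons]
    cases hbr : b.reverse with
    | nil => exact absurd (by simpa using congrArg List.reverse hbr) nb
    | cons c t =>
      have := hb.2
      rw [hbr] at this
      simpa using this

lemma pvStrip_join {a b : List Char} (ha : pvOK a) (hb : pvOK b) (na : a ≠ []) (nb : b ≠ []) :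
    PySem.Chars.strip (a ++ ' ' :: b) = a ++ ' ' :: b :=
  pvStrip_eq_self_of_OK (pvOK_join ha hb na nb)

lemma pvOK_flush {buf : List Char} (h : pvOK buf) (cs : List Char) :
    pvOK (pvRStripC buf cs ++ ['?']) := by
  constructor
  · cases hp : pvRStripC buf cs with
    | nil =>
      show PySem.Chars.isspace '?' = false
      decide
    | cons c t =>
      have hpre : (c :: t) <+: buf := hp ▸ pvRevDrop_prefix _ buf
      have := pvHeadOK_of_prefix hpre h.1
      simpa using this
  · rw [List.reverse_append]
    show PySem.Chars.isspace '?' = false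
    decide

-- the list of complete question units A's normalisation produces (pre-dedup), shared spec
def pvUnits : List Char → List (List Char) → List (List Char)
  | buf, [] => if buf = [] then [] else [pvRStripC buf " .,:;!".toList ++ ['?']]
  | buf, raw :: rest =>
    let text := pvClean raw
    if text = [] then pvUnits buf rest
    else
      let buffer := if buf = [] then text else buf ++ ' ' :: text
      if PySem.Chars.endswith buffer ['?'] then buffer :: pvUnits [] rest
      else pvUnits buffer rest

-- A's dedup pass as a plain recursion
def pvDedup (seen : PySem.Set (List Char)) : List (List Char) → List (List Char)
  | [] => []
  | u :: us =>
    let k := pvQKey u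
    if k ≠ [] ∧ k ∉ seen then u :: pvDedup (seen.add k) us else pvDedup seen us

lemma pvUnitsWF : ∀ (raws : List (List Char)) (buf : List Char), pvOK buf →
    ∀ u ∈ pvUnits buf raws, pvOK u ∧ u ≠ [] := by
  intro raws
  induction raws with
  | nil =>
    intro buf hb u hu
    by_cases h : buf = [] <;> simp [pvUnits, h] at hu
    subst hu
    exact ⟨pvOK_flush hb _, by simp⟩
  | cons raw rest ih =>
    intro buf hb u hu
    by_cases ht : pvClean raw = []
    · rw [pvUnits, if_pos ht] at hu
      exact ih buf hb u hu
    · rw [pvUnits, if_neg ht] at hu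
      set buffer := if buf = [] then pvClean raw else buf ++ ' ' :: pvClean raw with hbuf
      have hOKbuf : pvOK buffer := by
        rw [hbuf]
        by_cases h : buf = []
        · simpa [h] using pvOK_clean raw
        · simpa [h] using pvOK_join hb (pvOK_clean raw) h ht
      have hne : buffer ≠ [] := by
        rw [hbuf]
        by_cases h : buf = [] <;> simp [h, ht]
      by_cases hq : PySem.Chars.endswith buffer ['?'] = true
      · rw [if_pos hq] at hu
        rcases List.mem_cons.mp hu with hu | hu
        · exact hu ▸ ⟨hOKbuf, hne⟩
        · exact ih [] pvOK_nil u hu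
      · rw [if_neg hq] at hu
        exact ih buffer hOKbuf u hu

lemma pvNormFold : ∀ (raws : List (List Char)) (acc : List (List Char)) (buf : List Char),
    pvOK buf →
    (if (raws.foldl pvNormStep (acc, buf)).2 ≠ [] then
        (raws.foldl pvNormStep (acc, buf)).1 ++
          [pvRStripC (raws.foldl pvNormStep (acc, buf)).2 " .,:;!".toList ++ ['?']]
      else (raws.foldl pvNormStep (acc, buf)).1) = acc ++ pvUnits buf raws := by
  intro raws
  induction raws with
  | nil =>
    intro acc buf _
    by_cases h : buf = [] <;> simp [pvUnits, h]
  | cons raw rest ih =>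
    intro acc buf hb
    by_cases ht : pvClean raw = []
    · have hstep : pvNormStep (acc, buf) raw = (acc, buf) := by simp [pvNormStep, ht]
      rw [List.foldl_cons, hstep, pvUnits, if_pos ht]
      exact ih acc buf hb
    · rw [pvUnits, if_neg ht]
      set buffer := if buf = [] then pvClean raw else buf ++ ' ' :: pvClean raw with hbuf
      have hbuf' : (if buf ≠ [] then PySem.Chars.strip (buf ++ ' ' :: pvClean raw) else pvClean raw)
          = buffer := by
        by_cases h : buf = []
        · simp [hbuf, h]
        · simp only [hbuf, if_neg h, if_pos h, ne_eq, not_false_iff, if_true]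
          simpa [h] using pvStrip_join hb (pvOK_clean raw) h ht
      have hOKbuf : pvOK buffer := by
        rw [hbuf]
        by_cases h : buf = []
        · simpa [h] using pvOK_clean raw
        · simpa [h] using pvOK_join hb (pvOK_clean raw) h ht
      by_cases hq : PySem.Chars.endswith buffer ['?'] = true
      · have hstep : pvNormStep (acc, buf) raw = (acc ++ [buffer], []) := by
          simp only [pvNormStep, if_neg ht]
          rw [hbuf']  -- may need shaping
          simp [hq]
        rw [List.foldl_cons, hstep, if_pos hq]
        rw [ih (acc ++ [buffer]) [] pvOK_nil]
        simp
      · have hstep : pvNormStep (acc, buf) raw = (acc, buffer) := by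
          simp only [pvNormStep, if_neg ht]
          rw [hbuf']
          simp [hq]
        rw [List.foldl_cons, hstep, if_neg hq]
        exact ih acc buffer hOKbuf

lemma pvDedupFold : ∀ (us : List (List Char)) (res : List (List Char)) (seen : PySem.Set (List Char)),
    (us.foldl pvDedupStep (res, seen)).1 = res ++ pvDedup seen us := by
  intro us
  induction us with
  | nil => intro res seen; simp [pvDedup]
  | cons u rest ih =>
    intro res seen
    by_cases h : pvQKey u ≠ [] ∧ pvQKey u ∉ seen
    · have hstep : pvDedupStep (res, seen) u = (res ++ [u], seen.add (pvQKey u)) := by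
        simp [pvDedupStep, h]
      rw [List.foldl_cons, hstep, pvDedup, if_pos h, ih]
      simp
    · have hstep : pvDedupStep (res, seen) u = (res, seen) := by
        simp only [pvDedupStep]
        rw [if_neg h]
      rw [List.foldl_cons, hstep, pvDedup, if_neg h]
      exact ih res seen

lemma pvMainFold : ∀ (us : List (List Char)) (seen sq : PySem.Set (List Char))
    (qs adv : List (List Char)),
    (∀ u ∈ us, pvOK u ∧ u ≠ []) → (∀ k ∈ sq, k ∈ seen) →
    (((pvDedup seen us).foldl pvClassifyStep (qs, adv, sq)).1,
      ((pvDedup seen us).foldl pvClassifyStep (qs, adv, sq)).2.1)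
    = ((us.foldl pvEmit (seen, qs, adv)).2.1, (us.foldl pvEmit (seen, qs, adv)).2.2) := by
  intro us
  induction us with
  | nil => intro seen sq qs adv _ _; simp [pvDedup]
  | cons u rest ih =>
    intro seen sq qs adv hwf hsub
    obtain ⟨hOKu, hneu⟩ := hwf u (by simp)
    have hwf' : ∀ v ∈ rest, pvOK v ∧ v ≠ [] := fun v hv => hwf v (by simp [hv])
    by_cases hk : pvQKey u ≠ [] ∧ pvQKey u ∉ seen
    · -- kept by the dedup pass / emitted by B
      rw [pvDedup, if_pos hk]
      have hestep : pvEmit (seen, qs, adv) u =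
          (if PySem.Chars.endswith u ['?'] && decide (8 < u.length) &&
              !(pvAdviceMarkers.any (fun m => PySem.Chars.isIn m (PySem.Chars.lower u))) then
            (seen.add (pvQKey u), qs ++ [u], adv)
          else (seen.add (pvQKey u), qs, adv ++ [u])) := by
        simp only [pvEmit]
        rw [if_neg (fun h => h.elim hk.1 hk.2)]
      by_cases hq : (PySem.Chars.endswith u ['?'] && decide (8 < u.length) &&
          !(pvAdviceMarkers.any (fun m => PySem.Chars.isIn m (PySem.Chars.lower u)))) = true
      · have hcstep : pvClassifyStep (qs, adv, sq) u = (qs ++ [u], adv, sq.add (pvQKey u)) := by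
          simp only [pvClassifyStep, pvStrip_eq_self_of_OK hOKu]
          rw [if_neg hneu, if_pos hq,
            if_pos ⟨hk.1, fun h => hk.2 (hsub _ h)⟩]
        rw [List.foldl_cons, List.foldl_cons, hcstep, hestep, if_pos hq]
        refine ih (seen.add (pvQKey u)) (sq.add (pvQKey u)) (qs ++ [u]) adv hwf' ?_
        intro k hkm
        rcases (PySem.Set.mem_add sq (pvQKey u) k).mp hkm with h | h
        · exact (PySem.Set.mem_add seen (pvQKey u) k).mpr (Or.inl (hsub _ h))
        · exact (PySem.Set.mem_add seen (pvQKey u) k).mpr (Or.inr h)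
      · have hcstep : pvClassifyStep (qs, adv, sq) u = (qs, adv ++ [u], sq) := by
          simp only [pvClassifyStep, pvStrip_eq_self_of_OK hOKu]
          rw [if_neg hneu, if_neg hq]
        rw [List.foldl_cons, List.foldl_cons, hcstep, hestep, if_neg hq]
        refine ih (seen.add (pvQKey u)) sq qs (adv ++ [u]) hwf' ?_
        intro k hkm
        exact (PySem.Set.mem_add seen (pvQKey u) k).mpr (Or.inl (hsub _ hkm))
    · -- dropped by the dedup pass / skipped by B's emit
      rw [pvDedup, if_neg hk]
      have hor : pvQKey u = [] ∨ pvQKey u ∈ seen := by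
        by_cases h : pvQKey u = []
        · exact Or.inl h
        · rcases not_and_or.mp hk with h' | h'
          · exact absurd h (by simpa using h')
          · exact Or.inr (not_not.mp h')
      have hestep : pvEmit (seen, qs, adv) u = (seen, qs, adv) := by
        simp only [pvEmit]
        rw [if_pos hor]
      rw [List.foldl_cons, hestep]
      exact ih seen sq qs adv hwf' hsub

lemma pvBFold : ∀ (raws : List (List Char)) (buf : List Char)
    (st : PySem.Set (List Char) × List (List Char) × List (List Char)),
    (if (raws.foldl pvBStep (buf, st)).1 ≠ [] then
        pvEmit (raws.foldl pvBStep (buf, st)).2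
          (pvRStripC (raws.foldl pvBStep (buf, st)).1 " .,:;!".toList ++ ['?'])
      else (raws.foldl pvBStep (buf, st)).2) = (pvUnits buf raws).foldl pvEmit st := by
  intro raws
  induction raws with
  | nil =>
    intro buf st
    by_cases h : buf = [] <;> simp [pvUnits, h]
  | cons raw rest ih =>
    intro buf st
    by_cases ht : pvClean raw = []
    · have hstep : pvBStep (buf, st) raw = (buf, st) := by simp [pvBStep, ht]
      rw [List.foldl_cons, hstep, pvUnits, if_pos ht]
      exact ih buf st
    · rw [pvUnits, if_neg ht]
      set buffer := if buf = [] then pvClean raw else buf ++ ' ' :: pvClean raw with hbuf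
      have hbuf' : (if buf = [] then pvClean raw else buf ++ ' ' :: pvClean raw) = buffer := rfl
      by_cases hq : PySem.Chars.endswith buffer ['?'] = true
      · have hstep : pvBStep (buf, st) raw = ([], pvEmit st buffer) := by
          simp only [pvBStep, if_neg ht, hbuf', hq, if_true]
        rw [List.foldl_cons, hstep, if_pos hq, List.foldl_cons]
        exact ih [] (pvEmit st buffer)
      · have hstep : pvBStep (buf, st) raw = (buffer, st) := by
          simp only [pvBStep, if_neg ht, hbuf', hq]
          simp [hq]
        rw [List.foldl_cons, hstep, if_neg hq]
        exact ih buffer st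

lemma pvAB (items : List String) :
    split_questions_and_advice_py items = split_questions_and_advice_py_alt items := by
  simp only [split_questions_and_advice_py, split_questions_and_advice_py_alt, pvNormalize]
  rw [pvNormFold (items.map String.toList) [] [] pvOK_nil]
  rw [pvBFold (items.map String.toList) [] ([], [], [])]
  rw [List.nil_append]
  have hmain := pvMainFold (pvUnits [] (items.map String.toList)) [] [] [] []
    (pvUnitsWF _ [] pvOK_nil) (by intro k h; cases h)
  have hd := pvDedupFold (pvUnits [] (items.map String.toList)) [] []
  rw [List.nil_append] at hd
  rw [hd]
  exact congrArg (fun p => (p.1.map String.mk, p.2.map String.mk)) hmain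

-- ===== VERDICT (by name: the statement is the Claim_ definition above) =====
theorem split_questions_and_advice_py_spec : Claim_equal_split_questions_and_advice_py := by
  intro items _
  unfold Spec_split_questions_and_advice_py
  exact pvAB items
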